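-- pv_equiv track=rewrite | github.com/HeadHunter483/msu-ling | Syntax/Ver 2.0/tmp/morphres.py | adj_morph
-- ===== SOURCE A (Python) =====
-- def adj_morph(string):
--     str5=""
--     word = string.split()
--     mas=[]
--     mas2=[]
--
--     for current_word in word:
--         mas.append(current_word.lower())
--
--     while(len(mas2)!=6):
--         mas2.append("-")
--
--     for s in mas:
--         if (s=='nom' or s=='gen' or s=='dat' or s=='acc' or s=='ins' or s=='loc'):
--             mas2[1]=s
--         if (s=='sg' or s=='pl'):
--             mas2[2]=s
--         if (s=='plen' or s=='brev'):
--             mas2[3]=s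
--         if (s=='f' or s=='m' or s=='n'):
--             mas2[4]=s
--         if (s=='inan' or s=='anim'):
--             mas2[5]=s
--
--     i=0
--     for i in range(len(mas2)):
--         str5=str5+' '+mas2[i]
--
--     return str5
-- ===== SOURCE B (Python) =====
-- # Per-slot reverse search instead of a mutating pass: each slot is the last
-- # matching word, found independently; slot 0 is always '-'.
-- GROUPS = [
--     (),
--     ('nom', 'gen', 'dat', 'acc', 'ins', 'loc'),
--     ('sg', 'pl'),
--     ('plen', 'brev'),
--     ('f', 'm', 'n'),
--     ('inan', 'anim'),
-- ]
--
-- def adj_morph(string):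
--     words = [w.lower() for w in string.split()]
--     return "".join(" " + next((w for w in reversed(words) if w in g), "-") for g in GROUPS)
-- ===== Notes on version B (the rewrite author's own statement) =====
-- stated objective: idiomatic
-- what changed: Replaces A's mutating six-slot array updated by a forward pass of chained if-tests with six independent reverse searches (last matching word per tag group, default '-'), joined in one expression.
import Mathlib
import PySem

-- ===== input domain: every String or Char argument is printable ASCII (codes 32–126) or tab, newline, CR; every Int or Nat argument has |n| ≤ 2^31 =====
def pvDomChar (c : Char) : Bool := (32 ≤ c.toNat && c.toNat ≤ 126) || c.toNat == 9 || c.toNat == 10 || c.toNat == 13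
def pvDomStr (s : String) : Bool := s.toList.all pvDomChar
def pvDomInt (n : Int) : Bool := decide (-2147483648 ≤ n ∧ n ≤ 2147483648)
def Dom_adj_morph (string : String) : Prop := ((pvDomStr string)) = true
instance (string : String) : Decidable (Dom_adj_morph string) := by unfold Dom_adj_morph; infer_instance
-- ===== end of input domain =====

-- B is idiomatic: six independent reverse searches (last matching word per tag group) instead of A's mutating slot array; same cost.

-- ===== PORT A =====
-- one step of A's 'for s in mas' loop: the five chained if-tests mutating mas2
def adjStep (mas2 : List String) (s : String) : List String :=
  let m1 := if s = "nom" ∨ s = "gen" ∨ s = "dat" ∨ s = "acc" ∨ s = "ins" ∨ s = "loc" then mas2.set 1 s else mas2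
  let m2 := if s = "sg" ∨ s = "pl" then m1.set 2 s else m1
  let m3 := if s = "plen" ∨ s = "brev" then m2.set 3 s else m2
  let m4 := if s = "f" ∨ s = "m" ∨ s = "n" then m3.set 4 s else m3
  if s = "inan" ∨ s = "anim" then m4.set 5 s else m4

def adj_morph (string : String) : String :=
  let word := PySem.Str.split₀ string
  let mas := word.foldl (fun acc w => acc ++ [PySem.Str.lower w]) []
  let mas2 : List String := ["-", "-", "-", "-", "-", "-"]  -- the while loop appends '-' six times
  let mas2 := mas.foldl adjStep mas2
  (PySem.List.pyRange 0 (mas2.length : Int) 1).foldl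
    (fun str5 i => str5 ++ " " ++ PySem.List.pyGetD mas2 i "") ""

-- ===== PORT B =====
def adjGroups : List (List String) :=
  [[], ["nom", "gen", "dat", "acc", "ins", "loc"], ["sg", "pl"],
   ["plen", "brev"], ["f", "m", "n"], ["inan", "anim"]]

def adj_morph_alt (string : String) : String :=
  let words := (PySem.Str.split₀ string).map PySem.Str.lower
  PySem.Str.join "" (adjGroups.map (fun g => " " ++ ((words.reverse.find? (fun w => g.contains w)).getD "-")))

-- ===== PRECONDITION & SPEC =====
def Spec_adj_morph (string : String) (out : String) : Prop := out = adj_morph_alt string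
instance (string : String) (out : String) : Decidable (Spec_adj_morph string out) := by unfold Spec_adj_morph; infer_instance

-- ===== CLAIM (what is proved, stated in full; the proofs are below) =====
def Claim_equal_adj_morph : Prop := ∀ (string : String), Dom_adj_morph string → Spec_adj_morph string (adj_morph string)

-- ===== LEMMAS AND PROOFS =====

-- the last word of ws in group g, or "-"
def adjSlot (g : List String) (ws : List String) : String :=
  (ws.reverse.find? (fun w => g.contains w)).getD "-"

theorem adjFold_eq (ws : List String) :
    ws.foldl adjStep ["-", "-", "-", "-", "-", "-"] =
      ["-", adjSlot ["nom", "gen", "dat", "acc", "ins", "loc"] ws,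
        adjSlot ["sg", "pl"] ws, adjSlot ["plen", "brev"] ws,
        adjSlot ["f", "m", "n"] ws, adjSlot ["inan", "anim"] ws] := by
  induction ws using List.reverseRecOn with
  | nil => rfl
  | append_singleton ws w ih =>
      rw [List.foldl_append, List.foldl_cons, List.foldl_nil, ih]
      simp only [adjSlot, adjStep, List.reverse_append, List.reverse_singleton,
        List.singleton_append, List.find?_cons]
      by_cases h1 : w = "nom" ∨ w = "gen" ∨ w = "dat" ∨ w = "acc" ∨ w = "ins" ∨ w = "loc" <;>
        by_cases h2 : w = "sg" ∨ w = "pl" <;>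
        by_cases h3 : w = "plen" ∨ w = "brev" <;>
        by_cases h4 : w = "f" ∨ w = "m" ∨ w = "n" <;>
        by_cases h5 : w = "inan" ∨ w = "anim" <;>
        simp_all [List.contains_eq_mem, List.set]

theorem adj_morph_spec : Claim_equal_adj_morph := by
  intro string _
  show adj_morph string = adj_morph_alt string
  have hmap : ∀ (ws : List String) (acc : List String),
      ws.foldl (fun acc w => acc ++ [PySem.Str.lower w]) acc = acc ++ ws.map PySem.Str.lower := by
    intro ws
    induction ws with
    | nil => simp
    | cons w ws ih => intro acc; simp [ih]
  simp only [adj_morph, adj_morph_alt, adjGroups, hmap, List.nil_append, adjFold_eq]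
  have h0 : ∀ l : List String, l.find? (fun _ => false) = none := by
    intro l; exact List.find?_eq_none.mpr (by simp)
  have hr : PySem.List.pyRange 0 6 1 = [0, 1, 2, 3, 4, 5] := by decide
  apply String.ext
  simp [hr, h0, PySem.Str.join, PySem.Chars.join, adjSlot, PySem.List.pyGetD,
    PySem.List.pyGet?, PySem.List.pyIdx?, List.intercalate, String.toList_append]
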